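-- pv_equiv track=rewrite | github.com/zjuer-dm/Undergraduate-Graduation-Project | ros_inference/vlnce_baselines/common/utils.py | process_instr_encoding
-- ===== SOURCE A (Python) =====
-- def process_instr_encoding(instr_encoding):
--     type_encoding = []
--     subtask_type = 4  # 从4开始，CLS是1，SEP是2，1064是3
--     for idx, token in enumerate(instr_encoding):
--         if token == 101:
--             type_encoding.append(1)  # CLS
--         elif token == 102:
--             type_encoding.append(2)  # SEP
--         elif token == 1064:
--             type_encoding.append(3)  # |
--             subtask_type += 1
--         elif token == 0:
--             type_encoding.append(0)  # pad
--         else: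
--             type_encoding.append(subtask_type)
--     return type_encoding
-- ===== SOURCE B (Python) =====
-- def process_instr_encoding(instr_encoding):
--     # prefix table: number of 1064 (pipe) tokens strictly before each position
--     pipes_before = []
--     c = 0
--     for t in instr_encoding:
--         pipes_before.append(c)
--         if t == 1064:
--             c += 1
--     return [1 if t == 101 else 2 if t == 102 else 3 if t == 1064 else 0 if t == 0 else 4 + p
--             for t, p in zip(instr_encoding, pipes_before)]
-- ===== Notes on version B (the rewrite author's own statement) =====
-- stated objective: alternative
-- what changed: Replaces the single accumulator-threaded loop with a precomputed exclusive prefix-count table of pipe tokens plus a stateless per-token mapping pass (label = 4 + pipes_before[i] for ordinary tokens).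
import Mathlib
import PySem

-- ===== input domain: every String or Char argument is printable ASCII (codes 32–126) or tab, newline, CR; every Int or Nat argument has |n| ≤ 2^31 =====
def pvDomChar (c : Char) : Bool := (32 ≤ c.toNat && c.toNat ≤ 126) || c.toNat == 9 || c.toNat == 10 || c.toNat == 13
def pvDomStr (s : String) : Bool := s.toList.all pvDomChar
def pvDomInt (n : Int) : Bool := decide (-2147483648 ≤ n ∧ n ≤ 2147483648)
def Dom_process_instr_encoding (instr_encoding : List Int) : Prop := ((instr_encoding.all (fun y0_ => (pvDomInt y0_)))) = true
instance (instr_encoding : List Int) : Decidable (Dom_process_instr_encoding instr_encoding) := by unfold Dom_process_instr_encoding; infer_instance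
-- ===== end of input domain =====

-- B replaces A's accumulator-threaded loop by an exclusive prefix pipe-count table plus a stateless mapping pass (alternative decomposition, same cost).

-- ===== PORT A =====
-- A's loop: state = (type_encoding, subtask_type), appending to the output list.
def process_instr_encoding (instr_encoding : List Int) : List Int :=
  (instr_encoding.foldl (fun (st : List Int × Int) token =>
      if token == 101 then (st.1 ++ [1], st.2)
      else if token == 102 then (st.1 ++ [2], st.2)
      else if token == 1064 then (st.1 ++ [3], st.2 + 1)
      else if token == 0 then (st.1 ++ [0], st.2)
      else (st.1 ++ [st.2], st.2)) ([], 4)).1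

-- ===== PORT B =====
-- B's first pass: exclusive prefix count of 1064 tokens.
def pvPipesBefore (instr_encoding : List Int) : List Int :=
  (instr_encoding.foldl (fun (st : List Int × Int) t =>
      (st.1 ++ [st.2], if t == 1064 then st.2 + 1 else st.2)) ([], 0)).1

-- B's second pass: stateless mapping over (token, pipes_before) pairs.
def process_instr_encoding_alt (instr_encoding : List Int) : List Int :=
  (instr_encoding.zip (pvPipesBefore instr_encoding)).map (fun tp =>
    if tp.1 == 101 then 1 else if tp.1 == 102 then 2
    else if tp.1 == 1064 then 3 else if tp.1 == 0 then 0 else 4 + tp.2)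

-- ===== PRECONDITION & SPEC =====
def Spec_process_instr_encoding (instr_encoding : List Int) (out : List Int) : Prop := out = process_instr_encoding_alt instr_encoding
instance (instr_encoding : List Int) (out : List Int) : Decidable (Spec_process_instr_encoding instr_encoding out) := by unfold Spec_process_instr_encoding; infer_instance

-- ===== CLAIM (what is proved, stated in full; the proofs are below) =====
def Claim_equal_process_instr_encoding : Prop := ∀ (instr_encoding : List Int), Dom_process_instr_encoding instr_encoding → Spec_process_instr_encoding instr_encoding (process_instr_encoding instr_encoding)

-- ===== LEMMAS AND PROOFS =====

-- structural characterisation of A's loop body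
def aSpec : List Int → Int → List Int
  | [], _ => []
  | t :: ts, s =>
    (if t == 101 then 1 else if t == 102 then 2 else if t == 1064 then 3 else if t == 0 then 0 else s)
      :: aSpec ts (if t == 1064 then s + 1 else s)

-- structural characterisation of B's prefix-table loop
def pSpec : List Int → Int → List Int
  | [], _ => []
  | t :: ts, c => c :: pSpec ts (if t == 1064 then c + 1 else c)

theorem aFold_eq (l : List Int) (acc : List Int) (s : Int) :
    (l.foldl (fun (st : List Int × Int) token =>
      if token == 101 then (st.1 ++ [1], st.2)
      else if token == 102 then (st.1 ++ [2], st.2)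
      else if token == 1064 then (st.1 ++ [3], st.2 + 1)
      else if token == 0 then (st.1 ++ [0], st.2)
      else (st.1 ++ [st.2], st.2)) (acc, s)).1 = acc ++ aSpec l s := by
  induction l generalizing acc s with
  | nil => simp [aSpec]
  | cons t ts ih =>
    simp only [List.foldl_cons, aSpec]
    split_ifs <;> first
      | (rw [ih]; simp; done)
      | simp_all

theorem pFold_eq (l : List Int) (acc : List Int) (c : Int) :
    (l.foldl (fun (st : List Int × Int) t =>
      (st.1 ++ [st.2], if t == 1064 then st.2 + 1 else st.2)) (acc, c)).1 = acc ++ pSpec l c := by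
  induction l generalizing acc c with
  | nil => simp [pSpec]
  | cons t ts ih =>
    simp only [List.foldl_cons, pSpec]
    rw [ih]
    simp

theorem spec_corr (l : List Int) (c : Int) :
    aSpec l (4 + c) = (l.zip (pSpec l c)).map (fun tp =>
      if tp.1 == 101 then 1 else if tp.1 == 102 then 2
      else if tp.1 == 1064 then 3 else if tp.1 == 0 then 0 else 4 + tp.2) := by
  induction l generalizing c with
  | nil => simp [aSpec, pSpec]
  | cons t ts ih =>
    by_cases hp : (t == 1064) = true
    · have ht : t = 1064 := by simpa using hp
      subst ht
      simp only [aSpec, pSpec, List.zip_cons_cons, List.map_cons]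
      norm_num
      rw [show (4 : Int) + c + 1 = 4 + (c + 1) by ring]
      simpa using ih (c + 1)
    · simp only [aSpec, pSpec, hp, List.zip_cons_cons, List.map_cons, Bool.false_eq_true,
        ite_false]
      rw [ih]

-- ===== VERDICT (by name: the statement is the Claim_ definition above) =====
theorem process_instr_encoding_spec : Claim_equal_process_instr_encoding := by
  intro l _
  unfold Spec_process_instr_encoding process_instr_encoding process_instr_encoding_alt pvPipesBefore
  rw [aFold_eq, pFold_eq]
  simpa using spec_corr l 0
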